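-- pv_equiv track=rewrite | github.com/CMCedricM/Projects | youtube-api-intro/main.py | __findTag__
-- ===== SOURCE A (Python) =====
-- def __findTag__(url) -> str:
--     tag = ""
--     record = False
--
--     for aChar in url:
--         if aChar == '=':
--             record = True
--         elif record == True:
--             tag += aChar
--
--     return tag
-- ===== SOURCE B (Python) =====
-- def __findTag__(url) -> str:
--     parts = url.split('=')
--     return ''.join(parts[1:])
-- ===== Notes on version B (the rewrite author's own statement) =====
-- stated objective: idiomatic
-- what changed: Replaces the char-by-char flag-toggling accumulation loop with a split-then-concatenate decomposition: split the url on the separator and join all parts after the first.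
import Mathlib
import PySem

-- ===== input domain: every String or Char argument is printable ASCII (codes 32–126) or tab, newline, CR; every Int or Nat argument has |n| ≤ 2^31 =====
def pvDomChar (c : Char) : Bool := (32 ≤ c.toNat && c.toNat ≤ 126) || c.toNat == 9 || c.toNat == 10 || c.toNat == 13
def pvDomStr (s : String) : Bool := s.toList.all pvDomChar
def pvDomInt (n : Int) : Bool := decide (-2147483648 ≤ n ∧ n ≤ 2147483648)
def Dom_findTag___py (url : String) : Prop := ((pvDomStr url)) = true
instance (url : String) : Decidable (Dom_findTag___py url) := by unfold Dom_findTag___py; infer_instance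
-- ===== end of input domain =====

-- B replaces A's char-by-char flag-toggling accumulation with split('=') then join of all parts after the first (idiomatic decomposition).


-- ===== PORT A =====
-- tag is accumulated as a List Char (Python's str +=), record is the Bool flag; the loop is a foldl over the characters.
def findTag___py (url : String) : String :=
  let st := url.toList.foldl
    (fun (s : List Char × Bool) aChar =>
      if aChar = '=' then (s.1, true)
      else if s.2 = true then (s.1 ++ [aChar], s.2)
      else s)
    ([], false)
  String.ofList st.1

-- ===== PORT B =====
-- parts = url.split('=') ; return ''.join(parts[1:])
def findTag___py_alt (url : String) : String :=
  let parts := PySem.Chars.splitOn url.toList ['=']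
  String.ofList (PySem.Chars.join [] (parts.drop 1))

-- ===== PRECONDITION & SPEC =====
def Spec_findTag___py (url : String) (out : String) : Prop := out = findTag___py_alt url
instance (url : String) (out : String) : Decidable (Spec_findTag___py url out) := by unfold Spec_findTag___py; infer_instance

-- ===== CLAIM (what is proved, stated in full; the proofs are below) =====
def Claim_equal_findTag___py : Prop := ∀ (url : String), Dom_findTag___py url → Spec_findTag___py url (findTag___py url)

-- ===== LEMMAS AND PROOFS =====

-- Spec-level split of a char list on '=' (used only by the proofs).
def spEq : List Char → List (List Char)
  | [] => [[]]
  | c :: rest => if c = '=' then [] :: spEq rest else (spEq rest).modifyHead (c :: ·)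

theorem spEq_ne_nil (l : List Char) : spEq l ≠ [] := by
  cases l with
  | nil => simp [spEq]
  | cons c rest =>
    simp only [spEq]
    split
    · simp
    · cases h : spEq rest with
      | nil => exact absurd h (spEq_ne_nil rest)
      | cons p r => simp

theorem join_nil_cons (p : List Char) (rest : List (List Char)) :
    PySem.Chars.join [] (p :: rest) = p ++ PySem.Chars.join [] rest := by
  cases rest with
  | nil => simp [PySem.Chars.join_singleton, PySem.Chars.join_nil]
  | cons q r => rw [PySem.Chars.join_cons_cons]; simp

theorem spEq_join (l : List Char) :
    PySem.Chars.join [] (spEq l) = l.filter (· ≠ '=') := by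
  induction l with
  | nil => simp [spEq, PySem.Chars.join_singleton]
  | cons c rest ih =>
    by_cases hc : c = '='
    · subst hc
      rw [show spEq ('=' :: rest) = [] :: spEq rest from by simp [spEq], join_nil_cons]
      simpa using ih
    · cases h : spEq rest with
      | nil => exact absurd h (spEq_ne_nil rest)
      | cons p r =>
        rw [h] at ih
        simp only [spEq, if_neg hc, h, List.modifyHead_cons, join_nil_cons] at ih ⊢
        simp only [ne_eq, decide_not] at ih
        simp [List.filter_cons, hc, ← ih]

theorem spEq_tail_join (l : List Char) :
    PySem.Chars.join [] ((spEq l).drop 1)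
      = ((l.dropWhile (· ≠ '=')).drop 1).filter (· ≠ '=') := by
  induction l with
  | nil => simp [spEq, PySem.Chars.join_nil]
  | cons c rest ih =>
    by_cases hc : c = '='
    · subst hc
      simp only [spEq, if_pos rfl, List.drop_succ_cons, List.drop_zero, List.dropWhile_cons]
      simp [spEq_join]
    · cases h : spEq rest with
      | nil => exact absurd h (spEq_ne_nil rest)
      | cons p r =>
        rw [h] at ih
        simp only [spEq, if_neg hc, h, List.modifyHead_cons, List.drop_succ_cons,
          List.drop_zero, List.dropWhile_cons] at ih ⊢
        simp [hc, ih]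

theorem go_eq_spEq (fuel : Nat) (l cur : List Char) (acc : List (List Char))
    (h : l.length ≤ fuel) :
    PySem.Chars.splitOn.go ['='] fuel l cur acc
      = acc.reverse ++ (spEq l).modifyHead (cur.reverse ++ ·) := by
  induction fuel generalizing l cur acc with
  | zero =>
    have : l = [] := by cases l <;> simp_all
    subst this
    simp [PySem.Chars.splitOn.go, spEq]
  | succ fuel ih =>
    cases l with
    | nil => simp [PySem.Chars.splitOn.go, spEq]
    | cons c rest =>
      by_cases hc : c = '='
      · subst hc
        have hpre : List.isPrefixOf ['='] ('=' :: rest) = true := by simp [List.isPrefixOf]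
        rw [PySem.Chars.splitOn.go, if_pos hpre,
          show List.drop (['='].length) ('=' :: rest) = rest from rfl]
        simp only [List.length_cons] at h
        rw [ih rest [] (cur.reverse :: acc) (by omega)]
        have hne := spEq_ne_nil rest
        cases hs : spEq rest with
        | nil => exact absurd hs hne
        | cons p r => simp [spEq, hs]
      · have hpre : List.isPrefixOf ['='] (c :: rest) = false := by
          simp [List.isPrefixOf]
          exact fun hh => hc hh.symm
        rw [PySem.Chars.splitOn.go, if_neg (by simp [hpre])]
        simp only [List.length_cons] at h
        rw [ih rest (c :: cur) acc (by omega)]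
        have hne := spEq_ne_nil rest
        cases hs : spEq rest with
        | nil => exact absurd hs hne
        | cons p r => simp [spEq, hc, hs]

theorem foldlA_true (l : List Char) (tag : List Char) :
    l.foldl (fun (s : List Char × Bool) aChar =>
      if aChar = '=' then (s.1, true)
      else if s.2 = true then (s.1 ++ [aChar], s.2)
      else s) (tag, true)
    = (tag ++ l.filter (· ≠ '='), true) := by
  induction l generalizing tag with
  | nil => simp
  | cons c rest ih =>
    by_cases hc : c = '='
    · subst hc; simp [List.foldl_cons, ih]
    · simp [List.foldl_cons, hc, ih]

theorem foldlA_false (l : List Char) (tag : List Char) :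
    (l.foldl (fun (s : List Char × Bool) aChar =>
      if aChar = '=' then (s.1, true)
      else if s.2 = true then (s.1 ++ [aChar], s.2)
      else s) (tag, false)).1
    = tag ++ ((l.dropWhile (· ≠ '=')).drop 1).filter (· ≠ '=') := by
  induction l generalizing tag with
  | nil => simp
  | cons c rest ih =>
    by_cases hc : c = '='
    · subst hc
      simp [List.foldl_cons, foldlA_true]
    · simp [List.foldl_cons, hc, ih]

-- ===== VERDICT (by name: the statement is the Claim_ definition above) =====
theorem findTag___py_spec : Claim_equal_findTag___py := by
  intro url _
  unfold Spec_findTag___py findTag___py findTag___py_alt PySem.Chars.splitOn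
  simp only [foldlA_false, List.nil_append,
    go_eq_spEq (url.toList.length + 1) url.toList [] [] (by omega)]
  rw [show (spEq url.toList).modifyHead (List.reverse [] ++ ·) = spEq url.toList by
        cases h : spEq url.toList <;> simp]
  have ht := spEq_tail_join url.toList
  simp only [List.drop_one] at ht
  simp [ht]
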